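-- pv_equiv track=rewrite | github.com/Eric-Robert-Lawson/OrganismCore | qualia_candidate_axioms/historical/Solen/pt9/rush_e_v2.py | classify_v2
-- ===== SOURCE A (Python) =====
-- def classify_v2(voice):
--     s1_end = 10
--     s2_end = 16
--     sections = []
--     for i in range(len(voice)):
--         if i < s1_end:
--             sections.append(1)
--         elif i < s2_end:
--             sections.append(2)
--         else:
--             sections.append(3)
--     return sections
-- ===== SOURCE B (Python) =====
-- def classify_v2(voice):
--     n = len(voice)
--     a = min(n, 10)
--     b = max(0, min(n, 16) - 10)
--     c = max(0, n - 16)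
--     return [1] * a + [2] * b + [3] * c
-- ===== Notes on version B (the rewrite author's own statement) =====
-- stated objective: simpler
-- what changed: Replaces the per-index loop with three branches by a closed-form computation of the three section sizes (clamped by min/max) and list replication/concatenation.
import Mathlib
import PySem

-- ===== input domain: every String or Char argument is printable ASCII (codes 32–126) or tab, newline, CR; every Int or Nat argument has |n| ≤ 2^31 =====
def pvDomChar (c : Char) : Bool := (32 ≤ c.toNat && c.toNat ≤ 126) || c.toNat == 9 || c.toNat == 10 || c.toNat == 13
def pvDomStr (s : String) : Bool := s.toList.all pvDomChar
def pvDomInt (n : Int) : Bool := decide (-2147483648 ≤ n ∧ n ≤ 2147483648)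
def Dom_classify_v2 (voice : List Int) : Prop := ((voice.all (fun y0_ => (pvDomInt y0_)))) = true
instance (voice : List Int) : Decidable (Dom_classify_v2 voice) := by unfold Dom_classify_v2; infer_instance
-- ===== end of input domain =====

-- B replaces A's per-index loop by closed-form section sizes and replication (objective: simpler).

-- ===== PORT A =====
-- literal port: loop over range(len(voice)), appending 1/2/3 by index thresholds
def classify_v2 (voice : List Int) : List Int :=
  let s1_end : Int := 10
  let s2_end : Int := 16
  (PySem.List.pyRange 0 (voice.length : Int) 1).foldl
    (fun sections i =>
      if i < s1_end then sections ++ [1]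
      else if i < s2_end then sections ++ [2]
      else sections ++ [3]) []

-- ===== PORT B =====
-- literal port of Source B: three clamped sizes, replicate and concatenate
def classify_v2_alt (voice : List Int) : List Int :=
  let n : Int := (voice.length : Int)
  let a : Int := min n 10
  let b : Int := max 0 (min n 16 - 10)
  let c : Int := max 0 (n - 16)
  List.replicate a.toNat 1 ++ List.replicate b.toNat 2 ++ List.replicate c.toNat 3

-- ===== PRECONDITION & SPEC =====
def Spec_classify_v2 (voice : List Int) (out : List Int) : Prop := out = classify_v2_alt voice
instance (voice : List Int) (out : List Int) : Decidable (Spec_classify_v2 voice out) := by unfold Spec_classify_v2; infer_instance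

-- ===== CLAIM (what is proved, stated in full; the proofs are below) =====
def Claim_equal_classify_v2 : Prop := ∀ (voice : List Int), Dom_classify_v2 voice → Spec_classify_v2 voice (classify_v2 voice)

-- ===== LEMMAS AND PROOFS =====

-- closed Nat form both ports are reduced to
def pvSegs (n : Nat) : List Int :=
  List.replicate (min n 10) 1 ++ List.replicate (min n 16 - 10) 2 ++ List.replicate (n - 16) 3

theorem pvAlt_eq_segs (voice : List Int) : classify_v2_alt voice = pvSegs voice.length := by
  unfold classify_v2_alt pvSegs
  have h1 : (min (voice.length : Int) 10).toNat = min voice.length 10 := by omega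
  have h2 : (max 0 (min (voice.length : Int) 16 - 10)).toNat = min voice.length 16 - 10 := by omega
  have h3 : (max 0 ((voice.length : Int) - 16)).toNat = voice.length - 16 := by omega
  simp only [h1, h2, h3]

theorem pvA_fold (n : Nat) :
    (PySem.List.pyRange 0 (n : Int) 1).foldl
      (fun sections i =>
        if i < (10:Int) then sections ++ [(1:Int)]
        else if i < 16 then sections ++ [2]
        else sections ++ [3]) [] = pvSegs n := by
  induction n with
  | zero => simp [pvSegs]
  | succ n ih =>
    have hrw : PySem.List.pyRange 0 ((n:Int)+1) 1 =
        PySem.List.pyRange 0 (n:Int) 1 ++ [(n:Int)] := by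
      exact PySem.List.pyRange_one_succ_right (by omega)
    push_cast
    rw [hrw, List.foldl_append, ih]
    simp only [List.foldl]
    unfold pvSegs
    by_cases h10 : n < 10
    · have : ((n:Int) < 10) := by omega
      simp only [this, if_pos]
      have e1 : min (n+1) 10 = min n 10 + 1 := by omega
      have e2 : min (n+1) 16 - 10 = min n 16 - 10 := by omega
      have e3 : (n+1) - 16 = n - 16 := by omega
      have z2 : min n 16 - 10 = 0 := by omega
      have z3 : n - 16 = 0 := by omega
      rw [e1, e2, e3, List.replicate_succ']
      simp [z2, z3]
    · by_cases h16 : n < 16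
      · have hi10 : ¬ ((n:Int) < 10) := by omega
        have hi16 : ((n:Int) < 16) := by omega
        simp only [hi10, hi16, if_pos, if_false]
        have e1 : min (n+1) 10 = min n 10 := by omega
        have e2 : min (n+1) 16 - 10 = (min n 16 - 10) + 1 := by omega
        have e3 : (n+1) - 16 = n - 16 := by omega
        have z3 : n - 16 = 0 := by omega
        rw [e1, e2, e3, List.replicate_succ']
        simp [z3, List.append_assoc]
      · have hi10 : ¬ ((n:Int) < 10) := by omega
        have hi16 : ¬ ((n:Int) < 16) := by omega
        simp only [hi10, hi16, if_false]
        have e1 : min (n+1) 10 = min n 10 := by omega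
        have e2 : min (n+1) 16 - 10 = min n 16 - 10 := by omega
        have e3 : (n+1) - 16 = (n - 16) + 1 := by omega
        rw [e1, e2, e3, List.replicate_succ']
        simp [List.append_assoc]

-- ===== VERDICT (by name: the statement is the Claim_ definition above) =====
theorem classify_v2_spec : Claim_equal_classify_v2 := by
  intro voice _
  show classify_v2 voice = classify_v2_alt voice
  rw [pvAlt_eq_segs]
  exact pvA_fold voice.length
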